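-- pv_equiv track=rewrite | github.com/IES-Rafael-Alberti/dawb1-2425-ejercicios-u2-Agsergio04 | src/ej22_08.py | crear_triangulo
-- ===== SOURCE A (Python) =====
-- def crear_triangulo(altura):
--     cadena = ""
--     triangulo = ""
--     inicio = 1
--
--     for i in range(inicio,altura + 1,2):
--         cadena = str(i) + " " + cadena
--         triangulo = triangulo + cadena + " \n"
--
--     return triangulo
-- ===== SOURCE B (Python) =====
-- def crear_triangulo(altura):
--     odds = list(range(1, altura + 1, 2))
--     filas = []
--     for k in range(len(odds)):
--         filas.append(" ".join(str(x) for x in reversed(odds[:k + 1])) + "  \n")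
--     return "".join(filas)
-- ===== Notes on version B (the rewrite author's own statement) =====
-- stated objective: alternative
-- what changed: B precomputes the odds list and rebuilds every row independently from a reversed slice odds[:k+1] joined with ' ', instead of A's single loop that threads a growing prepended 'cadena' accumulator across iterations.
import Mathlib
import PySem

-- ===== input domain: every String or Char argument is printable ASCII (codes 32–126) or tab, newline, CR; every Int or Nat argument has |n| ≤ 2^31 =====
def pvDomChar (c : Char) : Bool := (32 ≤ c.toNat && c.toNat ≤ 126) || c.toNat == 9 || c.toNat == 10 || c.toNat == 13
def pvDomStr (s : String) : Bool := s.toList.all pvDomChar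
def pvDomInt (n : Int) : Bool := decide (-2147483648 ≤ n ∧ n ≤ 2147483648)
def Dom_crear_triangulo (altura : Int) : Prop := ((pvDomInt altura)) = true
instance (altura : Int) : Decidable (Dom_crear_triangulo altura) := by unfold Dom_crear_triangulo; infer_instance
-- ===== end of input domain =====

-- B rebuilds each row independently from a slice of the odds list instead of threading A's
-- growing 'cadena' accumulator across iterations (objective: alternative decomposition, same cost).

-- ===== PORT A =====
-- loop body of A: cadena is updated first, then appended (with " \n") to triangulo
def pvStepA (st : String × String) (i : Int) : String × String :=
  let cadena := PySem.Int.toStr i ++ " " ++ st.1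
  (cadena, st.2 ++ cadena ++ " \n")

def crear_triangulo (altura : Int) : String :=
  ((PySem.List.pyRange 1 (altura + 1) 2).foldl pvStepA ("", "")).2

-- ===== PORT B =====
-- one row of B: " ".join(str(x) for x in reversed(odds[:k+1])) + "  \n"
def pvRow (odds : List Int) (k : Int) : String :=
  PySem.Str.join " " ((PySem.List.slice odds none (some (k + 1))).reverse.map PySem.Int.toStr) ++ "  \n"

def crear_triangulo_alt (altura : Int) : String :=
  let odds := PySem.List.pyRange 1 (altura + 1) 2
  let filas := (PySem.List.pyRange 0 (PySem.List.len odds) 1).foldl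
    (fun (acc : List String) k => acc ++ [pvRow odds k]) []
  PySem.Str.join "" filas

-- ===== PRECONDITION & SPEC =====
def Spec_crear_triangulo (altura : Int) (out : String) : Prop := out = crear_triangulo_alt altura
instance (altura : Int) (out : String) : Decidable (Spec_crear_triangulo altura out) := by unfold Spec_crear_triangulo; infer_instance

-- ===== CLAIM (what is proved, stated in full; the proofs are below) =====
def Claim_equal_crear_triangulo : Prop := ∀ (altura : Int), Dom_crear_triangulo altura → Spec_crear_triangulo altura (crear_triangulo altura)

-- ===== LEMMAS AND PROOFS =====

-- cadena after A has processed the list l (char level)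
def pvCad (l : List Int) : List Char :=
  (l.reverse.map (fun i => PySem.Int.toChars i ++ [' '])).flatten

-- triangulo after A has processed the list l (char level): one block per prefix
def pvTri (l : List Int) : List Char :=
  ((List.range l.length).map (fun k => pvCad (l.take (k + 1)) ++ [' ', '\n'])).flatten

theorem pvCad_concat (l : List Int) (x : Int) :
    pvCad (l ++ [x]) = PySem.Int.toChars x ++ ' ' :: pvCad l := by
  simp [pvCad]

theorem pvFoldA_inv (l : List Int) :
    (l.foldl pvStepA ("", "")).1.toList = pvCad l ∧
    (l.foldl pvStepA ("", "")).2.toList = pvTri l := by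
  induction l using List.reverseRecOn with
  | nil => constructor <;> simp [pvCad, pvTri]
  | append_singleton l x ih =>
    rw [List.foldl_append]
    obtain ⟨h1, h2⟩ := ih
    have hws : (" \n" : String).toList = [' ', '\n'] := by decide
    have hsp : (" " : String).toList = [' '] := by decide
    constructor
    · simp [pvStepA, pvCad_concat, h1, PySem.Int.toList_toStr, hsp]
    · have hmap : (List.range l.length).map (fun k => pvCad ((l ++ [x]).take (k + 1)) ++ [' ', '\n'])
          = (List.range l.length).map (fun k => pvCad (l.take (k + 1)) ++ [' ', '\n']) := by
        apply List.map_congr_left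
        intro k hk
        rw [List.take_append_of_le_length (by have := List.mem_range.mp hk; omega)]
      have hlast : (l ++ [x]).take (l.length + 1) = l ++ [x] := by
        apply List.take_of_length_le; simp
      simp only [pvTri, List.length_append, List.length_cons, List.length_nil,
        List.range_succ, List.map_append, List.map_cons, List.map_nil,
        List.flatten_append, List.flatten_cons, List.flatten_nil, hmap, hlast, pvCad_concat]
      simp [pvStepA, h1, h2, PySem.Int.toList_toStr, pvTri, hws, hsp]

theorem pvJoin_space (c : List Char) (cs : List (List Char)) :
    PySem.Chars.join [' '] (c :: cs) ++ [' '] = ((c :: cs).map (· ++ [' '])).flatten := by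
  induction cs generalizing c with
  | nil => simp [PySem.Chars.join_singleton]
  | cons b u ih => rw [PySem.Chars.join_cons_cons]; simp_all

theorem pvJoin_empty (cs : List (List Char)) : PySem.Chars.join [] cs = cs.flatten := by
  induction cs with
  | nil => simp [PySem.Chars.join_nil]
  | cons a t ih =>
    cases t with
    | nil => simp [PySem.Chars.join_singleton]
    | cons b u => rw [PySem.Chars.join_cons_cons]; simp_all

theorem pvRow_toList (odds : List Int) (k : Nat) (hk : k < odds.length) :
    (pvRow odds (k : Int)).toList = pvCad (odds.take (k + 1)) ++ [' ', '\n'] := by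
  have hslice : PySem.List.slice odds none (some ((k : Int) + 1)) = odds.take (k + 1) := by
    have := PySem.List.slice_to_natCast odds (k + 1)
    simpa using this
  have hne : odds.take (k + 1) ≠ [] := by
    have hlen : (odds.take (k + 1)).length = min (k + 1) odds.length := by simp
    intro h
    rw [h] at hlen
    simp at hlen
    omega
  simp only [pvRow, hslice]
  obtain ⟨c, cs, hcons⟩ : ∃ c cs, (odds.take (k + 1)).reverse.map PySem.Int.toChars = c :: cs := by
    rcases h : (odds.take (k + 1)).reverse.map PySem.Int.toChars with _ | ⟨c, cs⟩
    · exfalso; apply hne; simpa using h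
    · exact ⟨_, _, rfl⟩
  have hjoin : (PySem.Str.join " " ((odds.take (k + 1)).reverse.map PySem.Int.toStr)).toList
      = PySem.Chars.join [' '] ((odds.take (k + 1)).reverse.map PySem.Int.toChars) := by
    simp [pysem, List.map_map, Function.comp_def, PySem.Int.toList_toStr]
  have hws : ("  \n" : String).toList = [' '] ++ [' ', '\n'] := by decide
  simp only [String.toList_append, hjoin, hws, hcons]
  rw [← List.append_assoc, pvJoin_space c cs]
  simp [pvCad, ← hcons, List.map_map, Function.comp_def]

theorem pvAlt_list (odds : List Int) :
    (PySem.Str.join "" ((PySem.List.pyRange 0 (PySem.List.len odds) 1).foldl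
      (fun (acc : List String) k => acc ++ [pvRow odds k]) [])).toList = pvTri odds := by
  rw [PySem.List.foldl_append_singleton_eq_map]
  have hr : PySem.List.pyRange 0 (PySem.List.len odds) 1
      = (List.range odds.length).map (fun k : Nat => (k : Int)) := by
    rw [PySem.List.len_eq]
    exact PySem.List.pyRange_zero_natCast odds.length
  rw [hr]
  have hjoin : (PySem.Str.join "" (((List.range odds.length).map (fun k : Nat => (k : Int))).map (pvRow odds))).toList
      = PySem.Chars.join [] ((((List.range odds.length).map (fun k : Nat => (k : Int))).map (pvRow odds)).map String.toList) := by
    simp [pysem]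
  rw [List.nil_append, hjoin, pvJoin_empty, pvTri]
  rw [List.map_map, List.map_map]
  exact congrArg List.flatten
    (List.map_congr_left (fun k hk => pvRow_toList odds k (List.mem_range.mp hk)))

theorem pvAlt_toList (altura : Int) :
    (crear_triangulo_alt altura).toList = pvTri (PySem.List.pyRange 1 (altura + 1) 2) := by
  simp only [crear_triangulo_alt]
  exact pvAlt_list _

-- ===== VERDICT (by name: the statement is the Claim_ definition above) =====
theorem crear_triangulo_spec : Claim_equal_crear_triangulo := by
  intro altura _
  unfold Spec_crear_triangulo crear_triangulo
  apply String.toList_injective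
  rw [(pvFoldA_inv (PySem.List.pyRange 1 (altura + 1) 2)).2, pvAlt_toList]
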